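-- pv_equiv track=rewrite | github.com/MarlonAnacona/ADA2 | Algoritmos/fuerza_bruta.py | combinacionesAsignatura
-- ===== SOURCE A (Python) =====
-- def combinations(iterable, r):
--     items = list(iterable)
--     n = len(items)
--
--     if r > n:
--         return []
--
--     indices = list(range(r))
--     combinations_list = [tuple(items[i] for i in indices)]
--
--     while True:
--         for i in reversed(range(r)):
--             if indices[i] != i + n - r:
--                 break
--         else:
--             return combinations_list
--
--         indices[i] += 1
--         for j in range(i + 1, r):
--             indices[j] = indices[j - 1] + 1
--
--         combinations_list.append(tuple(items[i] for i in indices))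
--
-- def combinacionesAsignatura(materia, asignaturas, solicitudes):
--
--   elementos = [e for e, asignacion in solicitudes.items() if materia in asignacion]
--   combinaciones = []
--
--   if asignaturas[materia] > findLength(elementos):
--     combinaciones.append(tuple(elementos))
--   else:
--     combinaciones = list(combinations(elementos, asignaturas[materia]))
--
--   return combinaciones
--
-- def findLength(string):
--
--     # Initialize count to zero
--     count = 0
--
--     # Counting character in a string
--     for i in string:
--         count += 1
--     # Returning count
--     return count
-- ===== SOURCE B (Python) =====
-- def comb(items, r):
--     # all r-combinations of items, lexicographic by position, via structural recursion
--     if r <= 0: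
--         return [()]
--     if not items:
--         return []
--     first, rest = items[0], items[1:]
--     return [(first,) + t for t in comb(rest, r - 1)] + comb(rest, r)
--
--
-- def combinacionesAsignatura(materia, asignaturas, solicitudes):
--     elementos = [e for e, asignacion in solicitudes.items() if materia in asignacion]
--     r = asignaturas[materia]
--     if r > len(elementos):
--         return [tuple(elementos)]
--     return comb(elementos, r)
-- ===== Notes on version B (the rewrite author's own statement) =====
-- stated objective: simpler
-- what changed: A's iterative index-array successor-stepping combinations generator (with its hand-rolled findLength counter) is replaced by a short structural recursion on the element list (comb(x::rest, r) = [x prepended to each comb(rest, r-1)] ++ comb(rest, r)), producing the same combinations in the same lexicographic order.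
import Mathlib
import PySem

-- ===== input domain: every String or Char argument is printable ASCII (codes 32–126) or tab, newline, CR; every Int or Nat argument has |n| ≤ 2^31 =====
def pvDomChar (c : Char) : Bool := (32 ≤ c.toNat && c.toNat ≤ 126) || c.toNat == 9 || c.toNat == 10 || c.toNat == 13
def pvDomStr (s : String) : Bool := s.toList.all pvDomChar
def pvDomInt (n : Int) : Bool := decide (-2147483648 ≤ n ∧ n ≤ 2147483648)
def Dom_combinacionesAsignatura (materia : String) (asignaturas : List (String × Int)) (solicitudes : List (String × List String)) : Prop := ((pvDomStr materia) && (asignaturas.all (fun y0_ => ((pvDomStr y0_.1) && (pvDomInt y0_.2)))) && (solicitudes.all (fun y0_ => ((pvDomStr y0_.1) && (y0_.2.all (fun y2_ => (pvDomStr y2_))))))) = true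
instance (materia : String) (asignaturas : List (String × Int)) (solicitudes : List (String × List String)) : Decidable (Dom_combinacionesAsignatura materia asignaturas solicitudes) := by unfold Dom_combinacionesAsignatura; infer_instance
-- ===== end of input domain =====

-- B replaces A's iterative index-stepping combinations generator by a short structural
-- recursion on the element list (objective: simpler); same return value wherever A returns.

-- ===== PORT A =====

-- findLength: the hand-written counting loop
def pvFindLength (s : List String) : Int := s.foldl (fun c _ => c + 1) 0

-- tuple(items[i] for i in indices); indices are always in range when this is reached,
-- so the pyGetD default "" is never read
def pvSel (items : List String) (indices : List Int) : List String :=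
  indices.map (fun i => PySem.List.pyGetD items i "")

-- 'for i in reversed(range(r)): if indices[i] != i + n - r: break / else: return'
def pvFindI (indices : List Int) (n r : Int) : Option Int :=
  (PySem.List.pyRange 0 r 1).reverse.find? (fun i => PySem.List.pyGetD indices i 0 != i + n - r)

-- 'indices[i] += 1; for j in range(i+1, r): indices[j] = indices[j-1] + 1'
-- (indices written/read are always in range, so pySetD/pyGetD defaults are never used)
def pvStep (indices : List Int) (i r : Int) : List Int :=
  (PySem.List.pyRange (i + 1) r 1).foldl
    (fun ind j => PySem.List.pySetD ind j (PySem.List.pyGetD ind (j - 1) 0 + 1))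
    (PySem.List.pySetD indices i (PySem.List.pyGetD indices i 0 + 1))

-- the 'while True' loop; fuel (n+1)^r bounds the iteration count (proved sufficient below)
def pvLoop (items : List String) (n r : Int) :
    Nat → List Int → List (List String) → List (List String)
  | 0, _, acc => acc
  | fuel + 1, indices, acc =>
    match pvFindI indices n r with
    | none => acc
    | some i =>
      let ind1 := pvStep indices i r
      pvLoop items n r fuel ind1 (acc ++ [pvSel items ind1])

def pvCombinations (items : List String) (r : Int) : List (List String) :=
  let n : Int := items.length
  if r > n then []
  else
    let indices := PySem.List.pyRange 0 r 1
    pvLoop items n r ((items.length + 1) ^ r.toNat) indices [pvSel items indices]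

def combinacionesAsignatura (materia : String) (asignaturas : List (String × Int)) (solicitudes : List (String × List String)) : List (List String) :=
  let elementos := (solicitudes.filter (fun p => p.2.contains materia)).map Prod.fst
  match asignaturas.find? (fun p => p.1 == materia) with
  | none => []   -- KeyError in Python; excluded by Pre_
  | some p =>
    if p.2 > pvFindLength elementos then [elementos]
    else pvCombinations elementos p.2

-- ===== PORT B =====

def pvComb (items : List String) (r : Int) : List (List String) :=
  if r ≤ 0 then [[]]
  else
    match items with
    | [] => []
    | first :: rest => (pvComb rest (r - 1)).map (fun t => first :: t) ++ pvComb rest r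
termination_by items.length

def combinacionesAsignatura_alt (materia : String) (asignaturas : List (String × Int)) (solicitudes : List (String × List String)) : List (List String) :=
  let elementos := (solicitudes.filter (fun p => p.2.contains materia)).map Prod.fst
  match asignaturas.find? (fun p => p.1 == materia) with
  | none => []   -- KeyError in Python; excluded by Pre_
  | some p =>
    if p.2 > (elementos.length : Int) then [elementos]
    else pvComb elementos p.2

-- ===== PRECONDITION & SPEC =====

-- Pre_ excludes only the inputs where Python A raises KeyError: materia not a key of asignaturas
def Pre_combinacionesAsignatura (materia : String) (asignaturas : List (String × Int)) (solicitudes : List (String × List String)) : Prop :=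
  materia ∈ asignaturas.map Prod.fst
instance (materia : String) (asignaturas : List (String × Int)) (solicitudes : List (String × List String)) : Decidable (Pre_combinacionesAsignatura materia asignaturas solicitudes) := by unfold Pre_combinacionesAsignatura; infer_instance

def pvWitness_combinacionesAsignatura : String × (List (String × Int)) × (List (String × List String)) :=
  ("m", [("m", 2)], [("ana", ["m", "x"]), ("bob", ["m"]), ("eva", ["m"]), ("zoe", ["y"])])

def Spec_combinacionesAsignatura (materia : String) (asignaturas : List (String × Int)) (solicitudes : List (String × List String)) (out : List (List String)) : Prop := out = combinacionesAsignatura_alt materia asignaturas solicitudes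
instance (materia : String) (asignaturas : List (String × Int)) (solicitudes : List (String × List String)) (out : List (List String)) : Decidable (Spec_combinacionesAsignatura materia asignaturas solicitudes out) := by unfold Spec_combinacionesAsignatura; infer_instance

-- ===== CLAIM (what is proved, stated in full; the proofs are below) =====
def Claim_equal_combinacionesAsignatura : Prop := ∀ (materia : String) (asignaturas : List (String × Int)) (solicitudes : List (String × List String)), Dom_combinacionesAsignatura materia asignaturas solicitudes → Pre_combinacionesAsignatura materia asignaturas solicitudes → Spec_combinacionesAsignatura materia asignaturas solicitudes (combinacionesAsignatura materia asignaturas solicitudes)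

-- ===== LEMMAS AND PROOFS =====

-- ---- proof-side notions: index combinations, the successor relation of A's loop ----

-- [a, a+1, ..., a+r-1]
def pvRamp (a : Int) (r : Nat) : List Int := (List.range r).map (fun (j : Nat) => a + (j : Int))

-- all sorted r-element index lists drawn from [a, a+k), lexicographically
def pvICombos (a : Int) : Nat → Nat → List (List Int)
  | _, 0 => [[]]
  | 0, _ + 1 => []
  | k + 1, r + 1 => (pvICombos (a + 1) k r).map (fun l => a :: l) ++ pvICombos (a + 1) k (r + 1)

-- one iteration of A's while-loop as a state transformer
def pvNext (n r : Int) (s : List Int) : Option (List Int) :=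
  (pvFindI s n r).map (fun i => pvStep s i r)

-- the loop, started at s, performs exactly the state sequence l and then stops
def pvRuns (n r : Int) : List Int → List (List Int) → Prop
  | s, [] => pvNext n r s = none
  | s, t :: l => pvNext n r s = some t ∧ pvRuns n r t l

-- partial run: from s through l, ending in state t (not necessarily stopped)
def pvSteps (n r : Int) : List Int → List (List Int) → List Int → Prop
  | s, [], t => s = t
  | s, u :: l, t => pvNext n r s = some u ∧ pvSteps n r u l t

-- abbreviation for the inner fill loop body
def pvFill (ind : List Int) (j : Int) : List Int :=
  PySem.List.pySetD ind j (PySem.List.pyGetD ind (j - 1) 0 + 1)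

lemma pvStep_eq_foldl_fill (s : List Int) (i r : Int) :
    pvStep s i r = (PySem.List.pyRange (i + 1) r 1).foldl pvFill
      (PySem.List.pySetD s i (PySem.List.pyGetD s i 0 + 1)) := rfl

-- ---- basic facts ----

lemma pvRamp_succ (a : Int) (r : Nat) : pvRamp a (r + 1) = a :: pvRamp (a + 1) r := by
  unfold pvRamp
  rw [List.range_succ_eq_map, List.map_cons, List.map_map]
  refine congrArg₂ List.cons (by simp) ?_
  exact List.map_congr_left (fun j _ => by
    simp only [Function.comp_apply, Nat.succ_eq_add_one]; push_cast; ring)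

lemma pvRamp_length (a : Int) (r : Nat) : (pvRamp a r).length = r := by
  simp [pvRamp]

lemma pvRamp_map_add_one (a : Int) (r : Nat) :
    (pvRamp a r).map (· + 1) = pvRamp (a + 1) r := by
  unfold pvRamp
  rw [List.map_map]
  exact List.map_congr_left (fun j _ => by simp only [Function.comp_apply]; ring)

lemma pyRange_zero_eq_ramp (r : Nat) :
    PySem.List.pyRange 0 (r : Int) 1 = pvRamp 0 r := by
  have h : ((r : Int) - 0).toNat = r := by omega
  rw [PySem.List.pyRange_one, h]; rfl

lemma pyRange_shift (a b : Int) :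
    PySem.List.pyRange (a + 1) (b + 1) 1 = (PySem.List.pyRange a b 1).map (· + 1) := by
  rw [PySem.List.pyRange_one, PySem.List.pyRange_one, List.map_map]
  have h : (b + 1 - (a + 1)).toNat = (b - a).toNat := by omega
  rw [h]
  exact List.map_congr_left (fun j _ => by simp only [Function.comp_apply]; ring)

lemma length_pvFill (s : List Int) (j : Int) : (pvFill s j).length = s.length := by
  unfold pvFill; rw [PySem.List.length_pySetD]

lemma length_foldl_fill (js : List Int) : ∀ s : List Int,
    (js.foldl pvFill s).length = s.length := by
  induction js with
  | nil => intro s; rfl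
  | cons j js ih => intro s; rw [List.foldl_cons, ih, length_pvFill]

lemma pvNext_length {n r : Int} {s t : List Int} (h : pvNext n r s = some t) :
    t.length = s.length := by
  unfold pvNext at h
  cases hf : pvFindI s n r with
  | none => rw [hf] at h; simp at h
  | some i =>
      rw [hf] at h
      simp only [Option.map_some, Option.some.injEq] at h
      rw [← h, pvStep_eq_foldl_fill]
      have := length_foldl_fill (PySem.List.pyRange (i + 1) r 1)
        (PySem.List.pySetD s i (PySem.List.pyGetD s i 0 + 1))
      rw [this, PySem.List.length_pySetD]

lemma find?_congr_mem {α : Type} (l : List α) (p q : α → Bool)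
    (h : ∀ a ∈ l, p a = q a) : l.find? p = l.find? q := by
  induction l with
  | nil => rfl
  | cons a l ih =>
      have ha := h a (List.mem_cons_self ..)
      cases hq : q a with
      | false =>
          simp only [List.find?_cons, ha, hq]
          exact ih (fun x hx => h x (List.mem_cons_of_mem _ hx))
      | true => simp only [List.find?_cons, ha, hq]

-- ---- the fill loop ----

lemma pvFill_cons (x : Int) (xs : List Int) (j : Int) (h1 : 1 ≤ j) :
    pvFill (x :: xs) (j + 1) = x :: pvFill xs j := by
  unfold pvFill
  have e0 : j + 1 - 1 = j := by omega
  have e1 : PySem.List.pyGetD (x :: xs) (j + 1 - 1) 0 = PySem.List.pyGetD xs (j - 1) 0 := by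
    rw [e0, PySem.List.pyGetD_of_nonneg _ _ (by omega : (0:Int) ≤ j),
        PySem.List.pyGetD_of_nonneg _ _ (by omega : (0:Int) ≤ j - 1)]
    have hj : j.toNat = (j - 1).toNat + 1 := by omega
    rw [hj, List.getD_cons_succ]
  rw [e1, PySem.List.pySetD_of_nonneg _ _ (by omega : (0:Int) ≤ j + 1),
      PySem.List.pySetD_of_nonneg _ _ (by omega : (0:Int) ≤ j)]
  have hj1 : (j + 1).toNat = j.toNat + 1 := by omega
  rw [hj1, List.set_cons_succ]

-- j ≥ 1 and in range everywhere: the fill loop ignores a cons'd head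
lemma foldl_fill_cons (js : List Int) : ∀ (x : Int) (xs : List Int),
    (∀ j ∈ js, 1 ≤ j ∧ j < (xs.length : Int)) →
    (js.map (· + 1)).foldl pvFill (x :: xs) = x :: js.foldl pvFill xs := by
  induction js with
  | nil => intro x xs _; rfl
  | cons j js ih =>
      intro x xs h
      obtain ⟨h1, h2⟩ := h j (List.mem_cons_self ..)
      simp only [List.map_cons, List.foldl_cons]
      rw [pvFill_cons x xs j h1]
      exact ih x (pvFill xs j) (fun j' hj' => by
        rw [length_pvFill]; exact h j' (List.mem_cons_of_mem _ hj'))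

lemma pvFill_map (xs : List Int) (j : Int) (h1 : 1 ≤ j) (h2 : j < (xs.length : Int)) :
    pvFill (xs.map (· + 1)) j = (pvFill xs j).map (· + 1) := by
  unfold pvFill
  have e1 : PySem.List.pyGetD (xs.map (· + 1)) (j - 1) 0
      = PySem.List.pyGetD xs (j - 1) 0 + 1 := by
    rw [PySem.List.pyGetD_eq_getElem (xs.map (· + 1)) 0 (by omega) (by simp; omega),
        PySem.List.pyGetD_eq_getElem xs 0 (by omega) (by omega)]
    simp
  rw [e1, PySem.List.pySetD_of_nonneg _ _ (by omega : (0:Int) ≤ j),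
      PySem.List.pySetD_of_nonneg _ _ (by omega : (0:Int) ≤ j), List.map_set]

-- valid indices: the fill loop commutes with mapping +1 over the values
lemma foldl_fill_map (js : List Int) : ∀ (xs : List Int),
    (∀ j ∈ js, 1 ≤ j ∧ j < (xs.length : Int)) →
    js.foldl pvFill (xs.map (· + 1)) = (js.foldl pvFill xs).map (· + 1) := by
  induction js with
  | nil => intro xs _; rfl
  | cons j js ih =>
      intro xs h
      obtain ⟨h1, h2⟩ := h j (List.mem_cons_self ..)
      simp only [List.foldl_cons]
      rw [pvFill_map xs j h1 h2]
      exact ih (pvFill xs j) (fun j' hj' => by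
        rw [length_pvFill]; exact h j' (List.mem_cons_of_mem _ hj'))

-- filling from position 1 over a ramp-shaped prefix produces a ramp
lemma foldl_fill_ramp (c : Nat) : ∀ (w : Int) (tail : List Int), tail.length = c →
    (PySem.List.pyRange 1 (1 + (c : Int)) 1).foldl pvFill (w :: tail) = pvRamp w (c + 1) := by
  induction c with
  | zero =>
      intro w tail hl
      have ht : tail = [] := List.eq_nil_of_length_eq_zero hl
      subst ht
      rw [PySem.List.pyRange_one_eq_nil (by omega)]
      simp [pvRamp]
  | succ c ih =>
      intro w tail hl
      cases tail with
      | nil => simp at hl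
      | cons t0 tl =>
          have hlen : tl.length = c := by simpa using hl
          push_cast
          rw [PySem.List.pyRange_one_cons (by omega : (1:Int) < 1 + ((c:Int) + 1))]
          simp only [List.foldl_cons]
          have hstep : pvFill (w :: t0 :: tl) 1 = w :: (w + 1) :: tl := by
            unfold pvFill
            have : (1:Int) - 1 = 0 := by ring
            rw [this, PySem.List.pyGetD_zero_cons,
                PySem.List.pySetD_of_nonneg _ _ (by omega : (0:Int) ≤ 1)]
            rfl
          rw [hstep]
          have hrg : PySem.List.pyRange (1 + 1) (1 + ((c:Int) + 1)) 1
              = (PySem.List.pyRange 1 (1 + (c:Int)) 1).map (· + 1) := by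
            have e : (1:Int) + ((c:Int) + 1) = (1 + (c:Int)) + 1 := by ring
            rw [e]
            exact pyRange_shift 1 (1 + (c:Int))
          rw [hrg, foldl_fill_cons _ w ((w + 1) :: tl) (fun j hj => by
            rw [PySem.List.mem_pyRange_one] at hj
            constructor
            · omega
            · simp [hlen]; omega)]
          rw [ih (w + 1) tl hlen]
          exact (pvRamp_succ w (c + 1)).symm

-- ---- simulation lemmas ----

lemma pvStep_map (u : List Int) (i : Int) (r : Nat) (h0 : 0 ≤ i)
    (h1 : i < (r : Int)) (hu : u.length = r) :
    pvStep (u.map (· + 1)) i (r : Int) = (pvStep u i (r : Int)).map (· + 1) := by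
  rw [pvStep_eq_foldl_fill, pvStep_eq_foldl_fill]
  have hbump : PySem.List.pySetD (u.map (· + 1)) i (PySem.List.pyGetD (u.map (· + 1)) i 0 + 1)
      = (PySem.List.pySetD u i (PySem.List.pyGetD u i 0 + 1)).map (· + 1) := by
    rw [PySem.List.pyGetD_eq_getElem (u.map (· + 1)) 0 h0 (by simp [hu]; omega),
        PySem.List.pyGetD_eq_getElem u 0 h0 (by rw [hu]; omega)]
    simp only [List.getElem_map]
    rw [PySem.List.pySetD_of_nonneg _ _ h0, PySem.List.pySetD_of_nonneg _ _ h0, List.map_set]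
  rw [hbump]
  apply foldl_fill_map
  intro j hj
  rw [PySem.List.mem_pyRange_one] at hj
  constructor
  · omega
  · rw [PySem.List.length_pySetD, hu]; omega

-- S1: shifting every index by 1 (and n by 1) commutes with one loop iteration
lemma pvNext_shift (k r : Nat) (u : List Int) (hu : u.length = r) :
    pvNext ((k : Int) + 1) (r : Int) (u.map (· + 1)) =
      (pvNext (k : Int) (r : Int) u).map (fun v => v.map (· + 1)) := by
  unfold pvNext
  have hf : pvFindI (u.map (· + 1)) ((k : Int) + 1) (r : Int) = pvFindI u (k : Int) (r : Int) := by
    unfold pvFindI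
    apply find?_congr_mem
    intro i hi
    rw [List.mem_reverse, PySem.List.mem_pyRange_one] at hi
    obtain ⟨h0, h1⟩ := hi
    rw [PySem.List.pyGetD_eq_getElem (u.map (· + 1)) 0 h0 (by simp [hu]; omega),
        PySem.List.pyGetD_eq_getElem u 0 h0 (by rw [hu]; omega)]
    simp only [List.getElem_map]
    rw [Bool.eq_iff_iff]
    simp only [bne_iff_ne, ne_eq]
    omega
  rw [hf]
  cases hf2 : pvFindI u (k : Int) (r : Int) with
  | none => rfl
  | some i =>
      have hi := List.mem_of_find?_eq_some hf2
      rw [List.mem_reverse, PySem.List.mem_pyRange_one] at hi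
      simp only [Option.map_some, Option.some.injEq]
      exact pvStep_map u i r hi.1 hi.2 hu

lemma reverse_range_succ (r : Nat) :
    (PySem.List.pyRange 0 ((r : Int) + 1) 1).reverse
      = ((PySem.List.pyRange 0 (r : Int) 1).reverse.map (· + 1)) ++ [0] := by
  rw [PySem.List.pyRange_one_cons (by omega : (0:Int) < (r : Int) + 1)]
  have e : PySem.List.pyRange (0 + 1) ((r : Int) + 1) 1
      = (PySem.List.pyRange 0 (r : Int) 1).map (· + 1) := pyRange_shift 0 (r : Int)
  rw [List.reverse_cons, e, ← List.map_reverse]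

lemma pvStep_cons (u : List Int) (i : Int) (r : Nat) (h0 : 0 ≤ i) (h1 : i < (r : Int))
    (hu : u.length = r) :
    pvStep (0 :: u.map (· + 1)) (i + 1) ((r : Int) + 1) = 0 :: (pvStep u i (r : Int)).map (· + 1) := by
  rw [pvStep_eq_foldl_fill, pvStep_eq_foldl_fill]
  have hget : PySem.List.pyGetD (0 :: u.map (· + 1)) (i + 1) 0 = PySem.List.pyGetD u i 0 + 1 := by
    rw [PySem.List.pyGetD_eq_getElem (0 :: u.map (· + 1)) 0 (by omega) (by simp [hu]; omega),
        PySem.List.pyGetD_eq_getElem u 0 h0 (by rw [hu]; omega)]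
    have e : (i + 1).toNat = i.toNat + 1 := by omega
    simp [e]
  have hset : PySem.List.pySetD (0 :: u.map (· + 1)) (i + 1) (PySem.List.pyGetD u i 0 + 1 + 1)
      = 0 :: PySem.List.pySetD (u.map (· + 1)) i (PySem.List.pyGetD u i 0 + 1 + 1) := by
    rw [PySem.List.pySetD_of_nonneg _ _ (by omega : (0:Int) ≤ i + 1),
        PySem.List.pySetD_of_nonneg _ _ h0]
    have e : (i + 1).toNat = i.toNat + 1 := by omega
    rw [e, List.set_cons_succ]
  have hbump : PySem.List.pySetD (u.map (· + 1)) i (PySem.List.pyGetD u i 0 + 1 + 1)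
      = (PySem.List.pySetD u i (PySem.List.pyGetD u i 0 + 1)).map (· + 1) := by
    rw [PySem.List.pySetD_of_nonneg _ _ h0, PySem.List.pySetD_of_nonneg _ _ h0, List.map_set]
  rw [hget, hset, hbump]
  have hrg : PySem.List.pyRange (i + 1 + 1) ((r : Int) + 1) 1
      = (PySem.List.pyRange (i + 1) (r : Int) 1).map (· + 1) := pyRange_shift (i + 1) (r : Int)
  rw [hrg]
  rw [foldl_fill_cons _ 0 _ (fun j hj => by
    rw [PySem.List.mem_pyRange_one] at hj
    constructor
    · omega
    · simp only [List.length_map, PySem.List.length_pySetD, hu]; omega)]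
  rw [foldl_fill_map _ _ (fun j hj => by
    rw [PySem.List.mem_pyRange_one] at hj
    constructor
    · omega
    · rw [PySem.List.length_pySetD, hu]; omega)]

-- S2: prefixing index 0 commutes with one loop iteration while the tail still moves
lemma pvNext_cons (k r : Nat) (u v : List Int) (hu : u.length = r)
    (h : pvNext (k : Int) (r : Int) u = some v) :
    pvNext ((k : Int) + 1) ((r : Int) + 1) (0 :: u.map (· + 1)) =
      some (0 :: v.map (· + 1)) := by
  unfold pvNext at h ⊢
  cases hf : pvFindI u (k : Int) (r : Int) with
  | none => rw [hf] at h; simp at h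
  | some i =>
      rw [hf] at h
      simp only [Option.map_some, Option.some.injEq] at h
      have hi := List.mem_of_find?_eq_some hf
      rw [List.mem_reverse, PySem.List.mem_pyRange_one] at hi
      have hfind : pvFindI (0 :: u.map (· + 1)) ((k : Int) + 1) ((r : Int) + 1) = some (i + 1) := by
        unfold pvFindI
        rw [reverse_range_succ r, List.find?_append, List.find?_map]
        have hc : (PySem.List.pyRange 0 (r : Int) 1).reverse.find?
            ((fun i' => PySem.List.pyGetD (0 :: u.map (· + 1)) i' 0 != i' + ((k : Int) + 1) - ((r : Int) + 1)) ∘ (· + 1))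
            = pvFindI u (k : Int) (r : Int) := by
          apply find?_congr_mem
          intro j hj
          rw [List.mem_reverse, PySem.List.mem_pyRange_one] at hj
          obtain ⟨h0, h1⟩ := hj
          simp only [Function.comp_apply]
          rw [PySem.List.pyGetD_eq_getElem (0 :: u.map (· + 1)) 0 (by omega) (by simp [hu]; omega),
              PySem.List.pyGetD_eq_getElem u 0 h0 (by rw [hu]; omega)]
          have e : (j + 1).toNat = j.toNat + 1 := by omega
          simp only [e, List.getElem_cons_succ, List.getElem_map]
          rw [Bool.eq_iff_iff]
          simp only [bne_iff_ne, ne_eq]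
          omega
        rw [hc, hf]
        rfl
      rw [hfind]
      simp only [Option.map_some, Option.some.injEq]
      rw [pvStep_cons u i r hi.1 hi.2 hu, h]

lemma pvRamp_getElem (a : Int) (r : Nat) (j : Nat) (hj : j < r) :
    (pvRamp a r)[j]'(by rw [pvRamp_length]; exact hj) = a + (j : Int) := by
  unfold pvRamp
  simp

-- S3: rollover at the exhausted tail
lemma pvNext_roll (k r : Nat) (h : r ≤ k) :
    pvNext ((k : Int) + 1) ((r : Int) + 1) (0 :: pvRamp ((k : Int) - (r : Int) + 1) r) =
      (if k = r then none else some (pvRamp 1 (r + 1))) := by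
  unfold pvNext
  have hfind : pvFindI (0 :: pvRamp ((k : Int) - (r : Int) + 1) r) ((k : Int) + 1) ((r : Int) + 1)
      = if k = r then none else some 0 := by
    unfold pvFindI
    rw [reverse_range_succ r, List.find?_append, List.find?_map]
    have h1 : (PySem.List.pyRange 0 (r : Int) 1).reverse.find?
        ((fun i' => PySem.List.pyGetD (0 :: pvRamp ((k : Int) - (r : Int) + 1) r) i' 0
            != i' + ((k : Int) + 1) - ((r : Int) + 1)) ∘ (· + 1)) = none := by
      rw [List.find?_eq_none]
      intro j hj
      rw [List.mem_reverse, PySem.List.mem_pyRange_one] at hj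
      obtain ⟨h0, h1⟩ := hj
      simp only [Function.comp_apply]
      rw [PySem.List.pyGetD_eq_getElem (0 :: pvRamp ((k : Int) - (r : Int) + 1) r) 0
            (by omega) (by simp [pvRamp_length]; omega)]
      have e : (j + 1).toNat = j.toNat + 1 := by omega
      simp only [e, List.getElem_cons_succ]
      rw [pvRamp_getElem _ r j.toNat (by omega)]
      simp only [bne_iff_ne, ne_eq, Decidable.not_not]
      omega
    rw [h1]
    have hmn : (Option.map (fun x : Int => x + 1) (none : Option Int)) = none := rfl
    rw [hmn, Option.none_or]
    by_cases hk : k = r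
    · subst hk
      rw [if_pos rfl, List.find?_cons_of_neg (by
        simp only [PySem.List.pyGetD_zero_cons, bne_iff_ne, ne_eq, Decidable.not_not]
        omega), List.find?_nil]
    · rw [if_neg hk, List.find?_cons_of_pos (by
        simp only [PySem.List.pyGetD_zero_cons, bne_iff_ne, ne_eq]
        omega)]
  rw [hfind]
  by_cases hk : k = r
  · rw [if_pos hk, if_pos hk]; rfl
  · rw [if_neg hk, if_neg hk]
    simp only [Option.map_some, Option.some.injEq]
    rw [pvStep_eq_foldl_fill]
    rw [PySem.List.pyGetD_zero_cons]
    have hbump : PySem.List.pySetD (0 :: pvRamp ((k : Int) - (r : Int) + 1) r) 0 (0 + 1)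
        = 1 :: pvRamp ((k : Int) - (r : Int) + 1) r := by
      rw [PySem.List.pySetD_of_nonneg _ _ (le_refl (0:Int))]
      rfl
    rw [hbump]
    have e : (0 : Int) + 1 = 1 := by ring
    rw [e]
    have e2 : (r : Int) + 1 = 1 + (r : Int) := by ring
    rw [e2]
    rw [foldl_fill_ramp r 1 _ (pvRamp_length _ _)]

-- ---- runs machinery ----

lemma pvRuns_nil_iff {n r : Int} {s : List Int} : pvRuns n r s [] ↔ pvNext n r s = none :=
  Iff.rfl

lemma pvRuns_cons_iff {n r : Int} {s t : List Int} {l : List (List Int)} :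
    pvRuns n r s (t :: l) ↔ (pvNext n r s = some t ∧ pvRuns n r t l) := Iff.rfl

lemma pvSteps_nil_iff {n r : Int} {s t : List Int} : pvSteps n r s [] t ↔ s = t := Iff.rfl

lemma pvSteps_cons_iff {n r : Int} {s u t : List Int} {l : List (List Int)} :
    pvSteps n r s (u :: l) t ↔ (pvNext n r s = some u ∧ pvSteps n r u l t) := Iff.rfl

lemma pvRuns_of_steps {n r : Int} {l₁ : List (List Int)} : ∀ {s t : List Int} {l₂ : List (List Int)},
    pvSteps n r s l₁ t → pvRuns n r t l₂ → pvRuns n r s (l₁ ++ l₂) := by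
  induction l₁ with
  | nil =>
      intro s t l₂ h₁ h₂
      rw [pvSteps_nil_iff] at h₁
      rw [List.nil_append, h₁]
      exact h₂
  | cons u l ih =>
      intro s t l₂ h₁ h₂
      obtain ⟨hn, hs⟩ := pvSteps_cons_iff.mp h₁
      exact pvRuns_cons_iff.mpr ⟨hn, ih hs h₂⟩

lemma pvSteps_snoc {n r : Int} {l : List (List Int)} : ∀ {s t t' : List Int},
    pvSteps n r s l t → pvNext n r t = some t' → pvSteps n r s (l ++ [t']) t' := by
  induction l with
  | nil =>
      intro s t t' h h'
      rw [pvSteps_nil_iff] at h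
      subst h
      exact pvSteps_cons_iff.mpr ⟨h', pvSteps_nil_iff.mpr rfl⟩
  | cons u l ih =>
      intro s t t' h h'
      obtain ⟨hn, hs⟩ := pvSteps_cons_iff.mp h
      exact pvSteps_cons_iff.mpr ⟨hn, ih hs h'⟩

lemma pvRuns_shift (k r : Nat) : ∀ (l : List (List Int)) (u : List Int),
    u.length = r → pvRuns (k : Int) (r : Int) u l →
    pvRuns ((k : Int) + 1) (r : Int) (u.map (· + 1)) (l.map (fun v => v.map (· + 1))) := by
  intro l
  induction l with
  | nil =>
      intro u hu hr
      rw [pvRuns_nil_iff] at hr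
      simp only [List.map_nil]
      rw [pvRuns_nil_iff, pvNext_shift k r u hu, hr]
      rfl
  | cons t l ih =>
      intro u hu hr
      obtain ⟨h1, h2⟩ := pvRuns_cons_iff.mp hr
      refine pvRuns_cons_iff.mpr ⟨?_, ?_⟩
      · rw [pvNext_shift k r u hu, h1]; rfl
      · exact ih t (by rw [pvNext_length h1, hu]) h2

lemma pvSteps_consify (k r : Nat) : ∀ (l : List (List Int)) (u : List Int),
    u.length = r → pvRuns (k : Int) (r : Int) u l →
    pvSteps ((k : Int) + 1) ((r : Int) + 1) (0 :: u.map (· + 1))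
      (l.map (fun v => 0 :: v.map (· + 1)))
      (0 :: (((u :: l).getLast?).getD []).map (· + 1)) := by
  intro l
  induction l with
  | nil =>
      intro u hu hr
      simp only [List.getLast?_singleton, Option.getD_some, List.map_nil]
      exact pvSteps_nil_iff.mpr rfl
  | cons v l ih =>
      intro u hu hr
      obtain ⟨h1, h2⟩ := pvRuns_cons_iff.mp hr
      simp only [List.map_cons, List.getLast?_cons_cons]
      exact pvSteps_cons_iff.mpr
        ⟨pvNext_cons k r u v hu h1, ih v (by rw [pvNext_length h1, hu]) h2⟩

lemma pvLoop_zero (items : List String) (n r : Int) (s : List Int) (acc : List (List String)) :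
    pvLoop items n r 0 s acc = acc := rfl

lemma pvLoop_succ_none (items : List String) (n r : Int) (f : Nat) (s : List Int)
    (acc : List (List String)) (hfi : pvFindI s n r = none) :
    pvLoop items n r (f + 1) s acc = acc := by
  show (match pvFindI s n r with
    | none => acc
    | some i => pvLoop items n r f (pvStep s i r) (acc ++ [pvSel items (pvStep s i r)])) = acc
  rw [hfi]

lemma pvLoop_succ_some (items : List String) (n r : Int) (f : Nat) (s : List Int)
    (acc : List (List String)) (i : Int) (hfi : pvFindI s n r = some i) :
    pvLoop items n r (f + 1) s acc
      = pvLoop items n r f (pvStep s i r) (acc ++ [pvSel items (pvStep s i r)]) := by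
  show (match pvFindI s n r with
    | none => acc
    | some i => pvLoop items n r f (pvStep s i r) (acc ++ [pvSel items (pvStep s i r)]))
    = pvLoop items n r f (pvStep s i r) (acc ++ [pvSel items (pvStep s i r)])
  rw [hfi]

lemma pvRuns_orbit (items : List String) (n r : Int) :
    ∀ (l : List (List Int)) (s : List Int) (fuel : Nat) (acc : List (List String)),
    pvRuns n r s l → l.length ≤ fuel →
    pvLoop items n r fuel s acc = acc ++ l.map (pvSel items) := by
  intro l
  induction l with
  | nil =>
      intro s fuel acc hr _
      rw [pvRuns_nil_iff] at hr
      unfold pvNext at hr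
      have hfi : pvFindI s n r = none := Option.map_eq_none_iff.mp hr
      cases fuel with
      | zero => simp [pvLoop_zero]
      | succ f => rw [pvLoop_succ_none items n r f s acc hfi]; simp
  | cons t l ih =>
      intro s fuel acc hr hf
      obtain ⟨h1, h2⟩ := pvRuns_cons_iff.mp hr
      unfold pvNext at h1
      obtain ⟨i, hi, hstep⟩ := Option.map_eq_some_iff.mp h1
      cases fuel with
      | zero => simp at hf
      | succ f =>
          rw [pvLoop_succ_some items n r f s acc i hi, hstep]
          rw [ih t f _ h2 (by simpa using hf)]
          simp

-- ---- pvICombos structure ----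

lemma pvICombos_zero (a : Int) (k : Nat) : pvICombos a k 0 = [[]] := by
  cases k <;> rfl

lemma pvICombos_nil (a : Int) (r : Nat) : pvICombos a 0 (r + 1) = [] := rfl

lemma pvICombos_succ (a : Int) (k r : Nat) :
    pvICombos a (k + 1) (r + 1)
      = (pvICombos (a + 1) k r).map (fun l => a :: l) ++ pvICombos (a + 1) k (r + 1) := rfl

lemma pvICombos_nil_of_lt (k : Nat) : ∀ (a : Int) (r : Nat), k < r → pvICombos a k r = [] := by
  induction k with
  | zero =>
      intro a r h
      cases r with
      | zero => omega
      | succ r => rfl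
  | succ k ih =>
      intro a r h
      cases r with
      | zero => omega
      | succ r =>
          rw [pvICombos_succ, ih (a + 1) r (by omega), ih (a + 1) (r + 1) (by omega)]
          rfl


lemma pvICombos_shift (k : Nat) : ∀ (r : Nat) (a : Int),
    pvICombos (a + 1) k r = (pvICombos a k r).map (fun l => l.map (· + 1)) := by
  induction k with
  | zero =>
      intro r a
      cases r with
      | zero => rfl
      | succ r => rfl
  | succ k ih =>
      intro r a
      cases r with
      | zero => simp [pvICombos_zero]
      | succ r =>
          rw [pvICombos_succ, pvICombos_succ, ih r (a + 1), ih (r + 1) (a + 1)]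
          simp only [List.map_append, List.map_map]
          congr 1

lemma pvICombos_getLast? (k : Nat) : ∀ (r : Nat) (a : Int), r ≤ k →
    (pvICombos a k r).getLast? = some (pvRamp (a + (k : Int) - (r : Int)) r) := by
  induction k with
  | zero =>
      intro r a h
      have : r = 0 := by omega
      subst this
      simp [pvICombos_zero, pvRamp]
  | succ k ih =>
      intro r a h
      cases r with
      | zero => simp [pvICombos_zero, pvRamp]
      | succ r =>
          rw [pvICombos_succ, List.getLast?_append]
          by_cases hrk : r + 1 ≤ k
          · rw [ih (r + 1) (a + 1) hrk]
            simp only [Option.some_or, Option.some.injEq]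
            congr 1
            push_cast
            omega
          · have hk : k = r := by omega
            subst hk
            rw [pvICombos_nil_of_lt k (a + 1) (k + 1) (by omega)]
            simp only [List.getLast?_nil, Option.none_or]
            rw [List.getLast?_map, ih k (a + 1) le_rfl]
            simp only [Option.map_some, Option.some.injEq]
            have e1 : (a + 1) + (k : Int) - (k : Int) = a + 1 := by ring
            rw [e1]
            rw [show (a + (((k + 1 : Nat)) : Int) - (((k + 1 : Nat)) : Int)) = a from by push_cast; omega]
            exact (pvRamp_succ a k).symm

lemma pvICombos_length_le (k : Nat) : ∀ (r : Nat) (a : Int),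
    (pvICombos a k r).length ≤ (k + 1) ^ r := by
  induction k with
  | zero =>
      intro r a
      cases r with
      | zero => simp [pvICombos_zero]
      | succ r => simp [pvICombos_nil]
  | succ k ih =>
      intro r a
      cases r with
      | zero => simp [pvICombos_zero]
      | succ r =>
          rw [pvICombos_succ]
          have h1 := ih r (a + 1)
          have h2 := ih (r + 1) (a + 1)
          have h5 : (k + 1) ^ r ≤ (k + 2) ^ r := Nat.pow_le_pow_left (by omega) r
          have h3 : (k + 1) ^ (r + 1) = (k + 1) ^ r * (k + 1) := pow_succ _ _
          have h4 : (k + 2) ^ (r + 1) = (k + 2) ^ r * (k + 2) := pow_succ _ _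
          have hlen : ((pvICombos (a + 1) k r).map (fun l => a :: l) ++ pvICombos (a + 1) k (r + 1)).length
              = (pvICombos (a + 1) k r).length + (pvICombos (a + 1) k (r + 1)).length := by simp
          rw [hlen]
          have : k + 1 + 1 = k + 2 := rfl
          rw [this]
          nlinarith [h1, h2, h3, h4, h5]

-- ---- the master lemma: A's loop enumerates pvICombos ----

lemma pvNext_r_zero (n r : Int) (s : List Int) (hr : r ≤ 0) : pvNext n r s = none := by
  unfold pvNext pvFindI
  rw [PySem.List.pyRange_one_eq_nil hr]
  rfl

lemma pvMaster (k : Nat) : ∀ (r : Nat), r ≤ k →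
    ∃ l, pvICombos 0 k r = pvRamp 0 r :: l ∧ pvRuns (k : Int) (r : Int) (pvRamp 0 r) l := by
  induction k with
  | zero =>
      intro r hr
      have : r = 0 := by omega
      subst this
      refine ⟨[], by simp [pvICombos_zero, pvRamp], ?_⟩
      exact pvRuns_nil_iff.mpr (pvNext_r_zero _ _ _ le_rfl)
  | succ k ih =>
      intro r hr
      cases r with
      | zero =>
          refine ⟨[], by simp [pvICombos_zero, pvRamp], ?_⟩
          exact pvRuns_nil_iff.mpr (pvNext_r_zero _ _ _ le_rfl)
      | succ r =>
          have hrk : r ≤ k := by omega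
          obtain ⟨l₁, e₁, run₁⟩ := ih r hrk
          have steps₁ := pvSteps_consify k r l₁ (pvRamp 0 r) (pvRamp_length 0 r) run₁
          have hlast : (((pvRamp 0 r :: l₁).getLast?).getD []) = pvRamp ((k : Int) - (r : Int)) r := by
            rw [← e₁, pvICombos_getLast? k r 0 hrk]
            rw [show ((0 : Int) + (k : Int) - (r : Int)) = (k : Int) - (r : Int) from by omega]
            rfl
          rw [hlast, pvRamp_map_add_one, pvRamp_map_add_one] at steps₁
          rw [show ((0 : Int) + 1) = 1 from by omega] at steps₁
          by_cases hk : k = r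
          · subst hk
            -- n = r: the tail run is the whole enumeration
            have e2 : pvICombos (0 + 1 : Int) k (k + 1) = [] :=
              pvICombos_nil_of_lt k (0 + 1) (k + 1) (by omega)
            refine ⟨l₁.map (fun v => 0 :: v.map (· + 1)), ?_, ?_⟩
            · rw [pvICombos_succ, e2, List.append_nil, pvICombos_shift k k 0, e₁]
              simp only [List.map_cons, List.map_map]
              rw [pvRamp_map_add_one,
                  show ((0 : Int) + 1) = 1 from by omega,
                  show pvRamp 0 (k + 1) = 0 :: pvRamp 1 k from by
                    rw [pvRamp_succ, show ((0 : Int) + 1) = 1 from by omega]]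
              rfl
            · have hroll := pvNext_roll k k le_rfl
              rw [if_pos rfl] at hroll
              have run_end : pvRuns ((k : Int) + 1) ((k : Int) + 1)
                  (0 :: pvRamp ((k : Int) - (k : Int) + 1) k) [] := pvRuns_nil_iff.mpr hroll
              have runs := pvRuns_of_steps steps₁ run_end
              rw [List.append_nil] at runs
              push_cast
              rw [show pvRamp 0 (k + 1) = 0 :: pvRamp 1 k from by
                    rw [pvRamp_succ, show ((0 : Int) + 1) = 1 from by omega]]
              exact runs
          · -- n > r: phase 1 then rollover then the shifted (k, r+1) run
            have hrk1 : r + 1 ≤ k := by omega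
            obtain ⟨l₂, e₂, run₂⟩ := ih (r + 1) hrk1
            have hroll := pvNext_roll k r hrk
            rw [if_neg hk] at hroll
            have steps₂ := pvSteps_snoc steps₁ hroll
            have run₂' := pvRuns_shift k (r + 1) l₂ (pvRamp 0 (r + 1)) (pvRamp_length _ _) run₂
            have hcast : (((r + 1 : Nat)) : Int) = (r : Int) + 1 := by push_cast; omega
            rw [hcast, pvRamp_map_add_one, show ((0 : Int) + 1) = 1 from by omega] at run₂'
            have runs := pvRuns_of_steps steps₂ run₂'
            refine ⟨(l₁.map (fun v => 0 :: v.map (· + 1)) ++ [pvRamp 1 (r + 1)])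
              ++ l₂.map (fun v => v.map (· + 1)), ?_, ?_⟩
            · rw [pvICombos_succ, pvICombos_shift k r 0, pvICombos_shift k (r + 1) 0, e₁, e₂]
              simp only [List.map_cons, List.map_map, List.cons_append, List.append_assoc]
              rw [pvRamp_map_add_one, pvRamp_map_add_one,
                  show ((0 : Int) + 1) = 1 from by omega,
                  show pvRamp 0 (r + 1) = 0 :: pvRamp 1 r from by
                    rw [pvRamp_succ, show ((0 : Int) + 1) = 1 from by omega]]
              rfl
            · push_cast
              rw [show pvRamp 0 (r + 1) = 0 :: pvRamp 1 r from by
                    rw [pvRamp_succ, show ((0 : Int) + 1) = 1 from by omega]]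
              exact runs

-- ---- B's recursion computes pvICombos selections ----

def pvCombN : List String → Nat → List (List String)
  | _, 0 => [[]]
  | [], _ + 1 => []
  | first :: rest, r + 1 =>
      (pvCombN rest r).map (fun t => first :: t) ++ pvCombN rest (r + 1)

lemma pvCombN_zero (items : List String) : pvCombN items 0 = [[]] := by
  cases items <;> rfl

lemma pvCombN_succ_cons (x : String) (xs : List String) (m : Nat) :
    pvCombN (x :: xs) (m + 1) = (pvCombN xs m).map (fun t => x :: t) ++ pvCombN xs (m + 1) := rfl

lemma pvComb_eq_combN : ∀ (items : List String) (r : Int),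
    pvComb items r = pvCombN items r.toNat := by
  intro items
  induction items with
  | nil =>
      intro r
      rw [pvComb]
      by_cases hr : r ≤ 0
      · rw [if_pos hr, show r.toNat = 0 from by omega, pvCombN_zero]
      · rw [if_neg hr, show r.toNat = r.toNat - 1 + 1 from by omega]
        rfl
  | cons x xs ih =>
      intro r
      rw [pvComb]
      by_cases hr : r ≤ 0
      · rw [if_pos hr, show r.toNat = 0 from by omega, pvCombN_zero]
      · rw [if_neg hr, show r.toNat = (r - 1).toNat + 1 from by omega, pvCombN_succ_cons,
            ih (r - 1), ih r, show r.toNat = (r - 1).toNat + 1 from by omega]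

lemma pvSel_icombos (k : Nat) : ∀ (r a : Nat) (items : List String),
    a + k = items.length →
    (pvICombos (a : Int) k r).map (pvSel items) = pvCombN (items.drop a) r := by
  induction k with
  | zero =>
      intro r a items h
      cases r with
      | zero => simp [pvICombos_zero, pvCombN_zero, pvSel]
      | succ r =>
          rw [pvICombos_nil, List.drop_eq_nil_of_le (by omega)]
          rfl
  | succ k ih =>
      intro r a items h
      cases r with
      | zero => simp [pvICombos_zero, pvCombN_zero, pvSel]
      | succ r =>
          have ha : a < items.length := by omega
          rw [pvICombos_succ, List.map_append, List.map_map,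
              List.drop_eq_getElem_cons ha, pvCombN_succ_cons]
          have hcast : (a : Int) + 1 = ((a + 1 : Nat) : Int) := by push_cast; ring
          rw [hcast]
          congr 1
          · rw [← ih r (a + 1) items (by omega), List.map_map]
            exact List.map_congr_left (fun v _ => by
              simp only [Function.comp_apply]
              show pvSel items ((a : Int) :: v) = items[a] :: pvSel items v
              simp only [pvSel, List.map_cons]
              rw [PySem.List.pyGetD_natCast, List.getD_eq_getElem items "" ha])
          · exact ih (r + 1) (a + 1) items (by omega)

-- ---- assembling the two ports ----

lemma pvCombinations_eq_comb (items : List String) (r : Int)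
    (h : r ≤ (items.length : Int)) : pvCombinations items r = pvComb items r := by
  unfold pvCombinations
  rw [if_neg (by omega : ¬ r > (items.length : Int))]
  by_cases hr0 : r ≤ 0
  · rw [PySem.List.pyRange_one_eq_nil hr0]
    have hruns : pvRuns (items.length : Int) r [] [] :=
      pvRuns_nil_iff.mpr (pvNext_r_zero _ _ _ hr0)
    rw [pvRuns_orbit items (items.length : Int) r [] [] _ _ hruns (by simp)]
    rw [pvComb_eq_combN, show r.toNat = 0 from by omega, pvCombN_zero]
    rfl
  · have h0 : (0 : Int) ≤ r := by omega
    have hcast : (r.toNat : Int) = r := by omega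
    have hrk : r.toNat ≤ items.length := by omega
    obtain ⟨l, e, runs⟩ := pvMaster items.length r.toNat hrk
    rw [hcast] at runs
    have hidx : PySem.List.pyRange 0 r 1 = pvRamp 0 r.toNat := by
      rw [← hcast]; exact pyRange_zero_eq_ramp r.toNat
    rw [hidx]
    have hlen : l.length ≤ (items.length + 1) ^ r.toNat := by
      have h1 := pvICombos_length_le items.length r.toNat 0
      rw [e] at h1
      simp only [List.length_cons] at h1
      omega
    rw [pvRuns_orbit items (items.length : Int) r l _ _ _ runs hlen]
    rw [pvComb_eq_combN]
    have hsel := pvSel_icombos items.length r.toNat 0 items (by simp)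
    rw [List.drop_zero] at hsel
    rw [← hsel, show ((0 : Nat) : Int) = 0 from rfl, e, List.map_cons]
    rfl

lemma pvFindLength_eq_length (s : List String) : pvFindLength s = (s.length : Int) := by
  have key : ∀ (t : List String) (c : Int), t.foldl (fun c _ => c + 1) c = c + t.length := by
    intro t
    induction t with
    | nil => intro c; simp
    | cons x xs ihx =>
        intro c
        rw [List.foldl_cons, ihx]
        simp only [List.length_cons]
        push_cast
        ring
  unfold pvFindLength
  rw [key]
  simp

-- ===== VERDICT (by name: the statement is the Claim_ definition above) =====
theorem combinacionesAsignatura_spec : Claim_equal_combinacionesAsignatura := by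
  intro materia asignaturas solicitudes _dom hpre
  unfold Spec_combinacionesAsignatura combinacionesAsignatura combinacionesAsignatura_alt
  dsimp only
  cases hfind : asignaturas.find? (fun p => p.1 == materia) with
  | none =>
      exfalso
      unfold Pre_combinacionesAsignatura at hpre
      obtain ⟨p, hp, he⟩ := List.mem_map.mp hpre
      have hall := List.find?_eq_none.mp hfind p hp
      rw [he] at hall
      simp at hall
  | some p =>
      dsimp only
      rw [pvFindLength_eq_length]
      split_ifs with hgt
      · rfl
      · exact pvCombinations_eq_comb _ p.2 (by omega)
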